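-- pv_equiv track=rewrite | github.com/jpalbeza/pelopium | p1_to_100/p2/fee_bo.py | even_fibo_elems
-- ===== SOURCE A (Python) =====
-- def fibo(n):
--     if n == 0 or n == 1:
--         return 1
--     else:
--         return fibo(n - 1) + fibo(n - 2)
--
-- def even_fibo_elems(up_to):
--     n = 1
--     fibo_n = fibo(n)
--     while fibo_n < up_to:
--         if fibo_n % 2 == 0:
--             yield fibo_n
--         n += 1
--         fibo_n = fibo(n)
-- ===== SOURCE B (Python) =====
-- def even_fibo_elems(up_to):
--     # Iterative Fibonacci: keep the running pair instead of recomputing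
--     # fibo(n) recursively each step.
--     a, b = 1, 2
--     while a < up_to:
--         if a % 2 == 0:
--             yield a
--         a, b = b, a + b
-- ===== Notes on version B (the rewrite author's own statement) =====
-- stated objective: faster
-- what changed: Replaces the naive exponential recursive fibo(n) recomputed from scratch on every loop iteration by a single pass maintaining the running Fibonacci pair (a,b).
import Mathlib
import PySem

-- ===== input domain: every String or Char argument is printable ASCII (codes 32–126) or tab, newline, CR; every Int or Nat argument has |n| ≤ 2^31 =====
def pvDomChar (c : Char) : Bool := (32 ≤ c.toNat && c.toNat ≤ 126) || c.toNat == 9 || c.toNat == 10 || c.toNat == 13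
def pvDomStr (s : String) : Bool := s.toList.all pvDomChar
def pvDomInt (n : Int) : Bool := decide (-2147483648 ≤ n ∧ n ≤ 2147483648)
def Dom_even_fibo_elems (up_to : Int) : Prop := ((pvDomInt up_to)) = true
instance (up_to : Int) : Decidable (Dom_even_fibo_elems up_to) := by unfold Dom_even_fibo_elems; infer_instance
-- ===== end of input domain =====

-- B replaces A's exponential recursive fibo, recomputed each iteration, by one
-- iterative pass maintaining the running Fibonacci pair (objective: faster).
-- Both Pythons are generators; the ports list the values the generator yields.

-- ===== PORT A =====
-- Python's fibo(n); exact for n ≥ 0 (the only arguments A ever passes: n starts at 1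
-- and is only incremented), so the index is carried as a Nat.
def fibo : Nat → Int
  | 0 => 1
  | 1 => 1
  | n + 2 => fibo (n + 1) + fibo n

theorem fibo_pos : ∀ n, 0 < fibo n := by
  intro n
  induction n using fibo.induct with
  | case1 => simp [fibo]
  | case2 => simp [fibo]
  | case3 n ih1 ih2 => simp only [fibo]; omega

theorem fibo_lt_succ (k : Nat) : fibo (k + 1) < fibo (k + 2) := by
  have h := fibo_pos k
  simp only [fibo]
  omega

-- the while loop of A: n = k + 1 (Python's n starts at 1), fibo_n recomputed each step
def loopA (up_to : Int) (k : Nat) : List Int :=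
  let fibo_n := fibo (k + 1)
  if fibo_n < up_to then
    (if fibo_n % 2 = 0 then [fibo_n] else []) ++ loopA up_to (k + 1)
  else []
termination_by (up_to - fibo (k + 1)).toNat
decreasing_by
  have h1 : fibo (k + 1) < fibo (k + 1 + 1) := fibo_lt_succ k
  omega

def even_fibo_elems (up_to : Int) : List Int := loopA up_to 0

-- ===== PORT B =====
-- the while loop of B over the running pair (a, b); the two Prop arguments are the
-- loop invariant (0 < a < b), needed only for termination
def loopB (up_to a b : Int) (h1 : 0 < a) (h2 : a < b) : List Int :=
  if a < up_to then
    (if a % 2 = 0 then [a] else []) ++ loopB up_to b (a + b) (by omega) (by omega)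
  else []
termination_by (up_to - a).toNat
decreasing_by omega

def even_fibo_elems_alt (up_to : Int) : List Int :=
  loopB up_to 1 2 (by omega) (by omega)

-- ===== PRECONDITION & SPEC =====
def Spec_even_fibo_elems (up_to : Int) (out : List Int) : Prop := out = even_fibo_elems_alt up_to
instance (up_to : Int) (out : List Int) : Decidable (Spec_even_fibo_elems up_to out) := by unfold Spec_even_fibo_elems; infer_instance

-- ===== CLAIM (what is proved, stated in full; the proofs are below) =====
def Claim_equal_even_fibo_elems : Prop := ∀ (up_to : Int), Dom_even_fibo_elems up_to → Spec_even_fibo_elems up_to (even_fibo_elems up_to)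

-- ===== LEMMAS AND PROOFS =====

theorem loopB_congr (up_to a b b' : Int) (p : 0 < a) (q : a < b) (p' : 0 < a)
    (q' : a < b') (h : b = b') : loopB up_to a b p q = loopB up_to a b' p' q' := by
  subst h; rfl

theorem loop_eq (up_to : Int) :
    ∀ (m k : Nat), (up_to - fibo (k + 1)).toNat ≤ m →
    ∀ (h1 : 0 < fibo (k + 1)) (h2 : fibo (k + 1) < fibo (k + 2)),
      loopB up_to (fibo (k + 1)) (fibo (k + 2)) h1 h2 = loopA up_to k := by
  intro m
  induction m with
  | zero =>
    intro k hm h1 h2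
    have hstop : ¬ fibo (k + 1) < up_to := by omega
    rw [loopB.eq_def, loopA.eq_def]
    simp [hstop]
  | succ m ih =>
    intro k hm h1 h2
    rw [loopB.eq_def, loopA.eq_def]
    by_cases hlt : fibo (k + 1) < up_to
    · simp only [hlt, if_true]
      congr 1
      have hm' : (up_to - fibo (k + 1 + 1)).toNat ≤ m := by
        have hmono : fibo (k + 1) < fibo (k + 1 + 1) := fibo_lt_succ k
        omega
      refine Eq.trans (loopB_congr up_to _ _ _ _ _ _ _ ?_)
        (ih (k + 1) hm' (fibo_pos (k + 1 + 1)) (fibo_lt_succ (k + 1)))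
      show fibo (k + 1) + fibo (k + 2) = fibo (k + 3)
      simp only [fibo]; ring
    · simp [hlt]

-- ===== VERDICT (by name: the statement is the Claim_ definition above) =====
theorem even_fibo_elems_spec : Claim_equal_even_fibo_elems := by
  intro up_to _
  unfold Spec_even_fibo_elems even_fibo_elems even_fibo_elems_alt
  exact (loop_eq up_to ((up_to - fibo (0 + 1)).toNat) 0 (le_refl _) (fibo_pos 1) (fibo_lt_succ 0)).symm
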